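-- pv_equiv track=rewrite | github.com/jiaqiluo/image-scanning | run.py | generate_issue_body
-- ===== SOURCE A (Python) =====
-- def generate_issue_body(image, vulnerabilities, can_ignore):
--     if vulnerabilities is None or len(vulnerabilities) == 0:
--         return "", False
--
--     body = "|Vulnerability ID|Title|Package Name|Fixed Version|Severity|URL|\n|---|---|---|---|---|---|"
--     critical = False
--     for vulnerability in vulnerabilities:
--         vulnerability_id = vulnerability["VulnerabilityID"]
--         package_name = vulnerability['PkgName']
--         title = vulnerability.get("Title", "")
--         primary_url = vulnerability.get("PrimaryURL", "")
--         key = image + "-" + package_name + "-" + vulnerability_id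
--         if can_ignore.get(key, False):
--             continue
--         fixed_version = vulnerability.get("FixedVersion", "")
--         severity = vulnerability.get("Severity", "")
--         if severity == "CRITICAL":
--             critical = True
--         body = body + "\n|" + vulnerability_id + "|" + title + "|" + package_name + "|" + fixed_version + "|" + \
--             severity + "|" + primary_url + "|"
--     return body, critical
-- ===== SOURCE B (Python) =====
-- HEADER = "|Vulnerability ID|Title|Package Name|Fixed Version|Severity|URL|\n|---|---|---|---|---|---|"
--
--
-- def _rows_and_critical(image, vulnerabilities, can_ignore):
--     """Recursively build (rows string, critical flag) for the suffix, back-to-front."""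
--     if not vulnerabilities:
--         return "", False
--     rest, crit = _rows_and_critical(image, vulnerabilities[1:], can_ignore)
--     v = vulnerabilities[0]
--     vid = v["VulnerabilityID"]
--     pkg = v['PkgName']
--     if can_ignore.get(image + "-" + pkg + "-" + vid, False):
--         return rest, crit
--     severity = v.get("Severity", "")
--     row = ("\n|" + vid + "|" + v.get("Title", "") + "|" + pkg + "|"
--            + v.get("FixedVersion", "") + "|" + severity + "|" + v.get("PrimaryURL", "") + "|")
--     return row + rest, crit or severity == "CRITICAL"
--
--
-- def generate_issue_body(image, vulnerabilities, can_ignore):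
--     if vulnerabilities is None or len(vulnerabilities) == 0:
--         return "", False
--     rows, critical = _rows_and_critical(image, vulnerabilities, can_ignore)
--     return HEADER + rows, critical
-- ===== Notes on version B (the rewrite author's own statement) =====
-- stated objective: alternative
-- what changed: Replaces A's stateful left-to-right loop that appends rows to a growing (body, critical) accumulator with a structural recursion on the list tail that builds the result back-to-front: each kept row is prepended to the recursively computed suffix, and critical is combined on the way out of the recursion.
import Mathlib
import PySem

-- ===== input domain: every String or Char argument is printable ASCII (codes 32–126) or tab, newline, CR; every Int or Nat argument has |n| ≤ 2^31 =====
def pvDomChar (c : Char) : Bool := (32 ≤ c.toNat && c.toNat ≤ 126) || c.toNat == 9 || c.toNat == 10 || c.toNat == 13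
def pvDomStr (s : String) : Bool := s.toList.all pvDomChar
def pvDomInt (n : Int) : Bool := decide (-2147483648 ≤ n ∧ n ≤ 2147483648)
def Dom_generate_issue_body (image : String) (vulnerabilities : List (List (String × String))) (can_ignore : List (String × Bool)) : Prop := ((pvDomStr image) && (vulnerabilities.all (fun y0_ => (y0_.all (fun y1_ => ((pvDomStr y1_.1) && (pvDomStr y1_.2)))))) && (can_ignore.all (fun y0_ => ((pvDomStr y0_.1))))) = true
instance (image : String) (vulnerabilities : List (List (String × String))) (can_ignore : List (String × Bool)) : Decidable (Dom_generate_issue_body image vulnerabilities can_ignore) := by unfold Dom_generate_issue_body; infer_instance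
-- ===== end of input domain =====

-- B replaces A's stateful left-to-right accumulator loop with a structural recursion that
-- builds the rows string back-to-front, prepending each kept row to the recursively built
-- suffix; objective: alternative decomposition, same cost.

-- ===== PORT A =====
def gibHeader : String := "|Vulnerability ID|Title|Package Name|Fixed Version|Severity|URL|\n|---|---|---|---|---|---|"

-- loop body of A; dict access ported via PySem.Dict over the association list
-- (bracket access ["VulnerabilityID"] / ['PkgName'] raises KeyError when missing: excluded by Pre_)
def gibStep (image : String) (can_ignore : List (String × Bool)) (st : String × Bool) (vulnerability : List (String × String)) : String × Bool :=
  let vulnerability_id := (PySem.Dict.mk vulnerability).getD "VulnerabilityID" ""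
  let package_name := (PySem.Dict.mk vulnerability).getD "PkgName" ""
  let title := (PySem.Dict.mk vulnerability).getD "Title" ""
  let primary_url := (PySem.Dict.mk vulnerability).getD "PrimaryURL" ""
  let key := image ++ "-" ++ package_name ++ "-" ++ vulnerability_id
  if (PySem.Dict.mk can_ignore).getD key false then st
  else
    let fixed_version := (PySem.Dict.mk vulnerability).getD "FixedVersion" ""
    let severity := (PySem.Dict.mk vulnerability).getD "Severity" ""
    let critical := if severity == "CRITICAL" then true else st.2
    (st.1 ++ "\n|" ++ vulnerability_id ++ "|" ++ title ++ "|" ++ package_name ++ "|" ++ fixed_version ++ "|" ++ severity ++ "|" ++ primary_url ++ "|", critical)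

def generate_issue_body (image : String) (vulnerabilities : List (List (String × String))) (can_ignore : List (String × Bool)) : String × Bool :=
  if vulnerabilities.length == 0 then ("", false)
  else vulnerabilities.foldl (gibStep image can_ignore) (gibHeader, false)

-- ===== PORT B =====
-- structural recursion of Source B's _rows_and_critical: build (rows, critical) of the suffix,
-- prepending each kept row to the recursive result
def gibRows (image : String) (can_ignore : List (String × Bool)) : List (List (String × String)) → String × Bool
  | [] => ("", false)
  | v :: t =>
    let rc := gibRows image can_ignore t
    let vid := (PySem.Dict.mk v).getD "VulnerabilityID" ""
    let pkg := (PySem.Dict.mk v).getD "PkgName" ""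
    if (PySem.Dict.mk can_ignore).getD (image ++ "-" ++ pkg ++ "-" ++ vid) false then rc
    else
      let severity := (PySem.Dict.mk v).getD "Severity" ""
      let row := "\n|" ++ vid ++ "|" ++ (PySem.Dict.mk v).getD "Title" "" ++ "|" ++ pkg ++ "|" ++
        (PySem.Dict.mk v).getD "FixedVersion" "" ++ "|" ++ severity ++ "|" ++
        (PySem.Dict.mk v).getD "PrimaryURL" "" ++ "|"
      (row ++ rc.1, rc.2 || (severity == "CRITICAL"))

def generate_issue_body_alt (image : String) (vulnerabilities : List (List (String × String))) (can_ignore : List (String × Bool)) : String × Bool :=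
  if vulnerabilities.isEmpty then ("", false)
  else
    let rc := gibRows image can_ignore vulnerabilities
    (gibHeader ++ rc.1, rc.2)

-- ===== PRECONDITION & SPEC =====
-- Pre_ excludes exactly the inputs where Python A raises KeyError: a vulnerability dict
-- missing the "VulnerabilityID" or "PkgName" key (both programs raise there).
def Pre_generate_issue_body (image : String) (vulnerabilities : List (List (String × String))) (can_ignore : List (String × Bool)) : Prop :=
  ∀ v ∈ vulnerabilities, "VulnerabilityID" ∈ v.map Prod.fst ∧ "PkgName" ∈ v.map Prod.fst
instance (image : String) (vulnerabilities : List (List (String × String))) (can_ignore : List (String × Bool)) : Decidable (Pre_generate_issue_body image vulnerabilities can_ignore) := by unfold Pre_generate_issue_body; infer_instance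

def pvWitness_generate_issue_body : String × (List (List (String × String))) × (List (String × Bool)) :=
  ("img", [[("VulnerabilityID", "CVE-2024-1"), ("PkgName", "openssl"), ("Severity", "CRITICAL")]], [("img-zlib-CVE-0", true)])

def Spec_generate_issue_body (image : String) (vulnerabilities : List (List (String × String))) (can_ignore : List (String × Bool)) (out : String × Bool) : Prop := out = generate_issue_body_alt image vulnerabilities can_ignore
instance (image : String) (vulnerabilities : List (List (String × String))) (can_ignore : List (String × Bool)) (out : String × Bool) : Decidable (Spec_generate_issue_body image vulnerabilities can_ignore out) := by unfold Spec_generate_issue_body; infer_instance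

-- ===== CLAIM (what is proved, stated in full; the proofs are below) =====
def Claim_equal_generate_issue_body : Prop := ∀ (image : String) (vulnerabilities : List (List (String × String))) (can_ignore : List (String × Bool)), Dom_generate_issue_body image vulnerabilities can_ignore → Pre_generate_issue_body image vulnerabilities can_ignore → Spec_generate_issue_body image vulnerabilities can_ignore (generate_issue_body image vulnerabilities can_ignore)

-- ===== LEMMAS AND PROOFS =====
-- A's left fold from accumulator (s, b) equals s / b combined with B's right-to-left recursion
theorem gib_loop_eq (image : String) (can_ignore : List (String × Bool)) (l : List (List (String × String))) :
    ∀ (s : String) (b : Bool),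
      l.foldl (gibStep image can_ignore) (s, b) =
        (s ++ (gibRows image can_ignore l).1, b || (gibRows image can_ignore l).2) := by
  induction l with
  | nil => intro s b; simp [gibRows]
  | cons v t ih =>
    intro s b
    simp only [List.foldl_cons, gibRows]
    by_cases hig : (PySem.Dict.mk can_ignore).getD
        (image ++ "-" ++ (PySem.Dict.mk v).getD "PkgName" "" ++ "-" ++ (PySem.Dict.mk v).getD "VulnerabilityID" "") false = true
    · have hstep : gibStep image can_ignore (s, b) v = (s, b) := by simp [gibStep, hig]
      rw [hstep, ih, if_pos hig]
    · have hstep : gibStep image can_ignore (s, b) v =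
          (s ++ ("\n|" ++ (PySem.Dict.mk v).getD "VulnerabilityID" "" ++ "|" ++ (PySem.Dict.mk v).getD "Title" "" ++ "|" ++
            (PySem.Dict.mk v).getD "PkgName" "" ++ "|" ++ (PySem.Dict.mk v).getD "FixedVersion" "" ++ "|" ++
            (PySem.Dict.mk v).getD "Severity" "" ++ "|" ++ (PySem.Dict.mk v).getD "PrimaryURL" "" ++ "|"),
           if (PySem.Dict.mk v).getD "Severity" "" == "CRITICAL" then true else b) := by
        simp only [gibStep]
        rw [if_neg hig]
        refine Prod.ext ?_ rfl
        apply String.toList_inj.mp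
        simp
      rw [hstep, ih, if_neg hig]
      refine Prod.ext ?_ ?_
      · apply String.toList_inj.mp
        simp
      · cases hc : (PySem.Dict.mk v).getD "Severity" "" == "CRITICAL" <;> cases b <;>
          cases h2 : (gibRows image can_ignore t).2 <;> simp

-- ===== VERDICT (by name: the statement is the Claim_ definition above) =====
theorem generate_issue_body_spec : Claim_equal_generate_issue_body := by
  intro image vulnerabilities can_ignore _ _
  unfold Spec_generate_issue_body generate_issue_body generate_issue_body_alt
  cases vulnerabilities with
  | nil => simp
  | cons v t =>
    simp only [List.length_cons, List.isEmpty_cons]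
    rw [gib_loop_eq]
    simp
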